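-- pv_equiv track=rewrite | github.com/phuquy007/nimo_lottery | analystBox.py | minBox
-- ===== SOURCE A (Python) =====
-- def minBox(allBoxes, inputBox):
--     result = 0
--     count = 0
--     for box in allBoxes:
--         if box["box"] != inputBox:
--             count += 1
--             if count > result:
--                 result = count
--         else:
--             count = 0
--     return result
-- ===== SOURCE B (Python) =====
-- def minBox(allBoxes, inputBox):
--     # Run-length encode the boolean key (box != inputBox), newest run first,
--     # then take the longest run among the non-matching (True) runs.
--     runs = []  # maximal consecutive runs as (key, length), most recent run first
--     for b in allBoxes:
--         k = b["box"] != inputBox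
--         if runs and runs[0][0] == k:
--             runs[0] = (k, runs[0][1] + 1)
--         else:
--             runs.insert(0, (k, 1))
--     return max((n for k, n in runs if k), default=0)
-- ===== Notes on version B (the rewrite author's own statement) =====
-- stated objective: alternative
-- what changed: B replaces A's running counter-with-reset-and-max by a build-then-reduce decomposition: it run-length-encodes the boolean key (box != inputBox) into explicit maximal runs and then takes the maximum length over the non-matching runs.
import Mathlib
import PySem

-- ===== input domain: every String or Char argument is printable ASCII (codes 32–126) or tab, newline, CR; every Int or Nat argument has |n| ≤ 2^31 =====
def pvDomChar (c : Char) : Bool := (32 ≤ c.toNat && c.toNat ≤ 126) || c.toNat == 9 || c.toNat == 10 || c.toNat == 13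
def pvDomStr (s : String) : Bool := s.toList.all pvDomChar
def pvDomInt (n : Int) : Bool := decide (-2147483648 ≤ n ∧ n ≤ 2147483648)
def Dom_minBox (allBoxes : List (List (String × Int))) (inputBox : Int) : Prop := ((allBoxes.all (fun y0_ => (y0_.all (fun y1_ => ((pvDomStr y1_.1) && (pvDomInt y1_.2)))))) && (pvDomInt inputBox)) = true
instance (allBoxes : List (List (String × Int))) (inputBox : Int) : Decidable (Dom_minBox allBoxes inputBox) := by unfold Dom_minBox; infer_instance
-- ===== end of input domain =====

-- B run-length-encodes the key (box != inputBox) into explicit runs and takes the max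
-- non-matching run length, instead of A's running counter with reset; same cost.


-- box["box"]: first-match lookup in the association list (Python dict access)
def boxGet? (box : List (String × Int)) : Option Int :=
  (box.find? (fun p => p.1 == "box")).map (·.2)

-- ===== PORT A =====
def minBoxLoop (inputBox : Int) : List (List (String × Int)) → Int → Int → Int
  | [], result, _ => result
  | box :: rest, result, count =>
    if (boxGet? box).getD 0 ≠ inputBox then
      let count' := count + 1
      if count' > result then minBoxLoop inputBox rest count' count'
      else minBoxLoop inputBox rest result count'
    else minBoxLoop inputBox rest result 0

def minBox (allBoxes : List (List (String × Int))) (inputBox : Int) : Int :=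
  minBoxLoop inputBox allBoxes 0 0

-- ===== PORT B =====
-- one step of B's loop: merge the box's key into the run list (most recent run first)
def runsStep (inputBox : Int) (runs : List (Bool × Int)) (box : List (String × Int)) : List (Bool × Int) :=
  let k : Bool := decide ((boxGet? box).getD 0 ≠ inputBox)
  match runs with
  | (k', n) :: t => if k' == k then (k, n + 1) :: t else (k, 1) :: (k', n) :: t
  | [] => [(k, 1)]

def minBox_alt (allBoxes : List (List (String × Int))) (inputBox : Int) : Int :=
  (((allBoxes.foldl (runsStep inputBox) []).filterMap
      (fun p => if p.1 then some p.2 else none)).foldl max 0)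

-- ===== PRECONDITION & SPEC =====
-- Pre_ excludes boxes without a "box" key, on which the Python (A and B alike) raises KeyError.
def Pre_minBox (allBoxes : List (List (String × Int))) (inputBox : Int) : Prop :=
  ∀ box ∈ allBoxes, (boxGet? box).isSome = true
instance (allBoxes : List (List (String × Int))) (inputBox : Int) : Decidable (Pre_minBox allBoxes inputBox) := by unfold Pre_minBox; infer_instance
def pvWitness_minBox : (List (List (String × Int))) × Int :=
  ([[("box", 1)], [("box", 2)], [("box", 2)]], 1)

def Spec_minBox (allBoxes : List (List (String × Int))) (inputBox : Int) (out : Int) : Prop := out = minBox_alt allBoxes inputBox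
instance (allBoxes : List (List (String × Int))) (inputBox : Int) (out : Int) : Decidable (Spec_minBox allBoxes inputBox out) := by unfold Spec_minBox; infer_instance

-- ===== CLAIM (what is proved, stated in full; the proofs are below) =====
def Claim_equal_minBox : Prop := ∀ (allBoxes : List (List (String × Int))) (inputBox : Int), Dom_minBox allBoxes inputBox → Pre_minBox allBoxes inputBox → Spec_minBox allBoxes inputBox (minBox allBoxes inputBox)

-- ===== LEMMAS AND PROOFS =====

-- max of the non-matching run lengths (B's final reduction)
def ansB (runs : List (Bool × Int)) : Int :=
  (runs.filterMap (fun p => if p.1 then some p.2 else none)).foldl max 0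

-- length of the current (head) run if it is a non-matching run, else 0
def headLen (runs : List (Bool × Int)) : Int :=
  match runs with
  | (true, n) :: _ => n
  | _ => 0

theorem foldl_max_max (l : List Int) : ∀ a b : Int, l.foldl max (max a b) = max a (l.foldl max b) := by
  induction l with
  | nil => intro a b; rfl
  | cons x t ih =>
    intro a b
    simp only [List.foldl_cons]
    rw [max_assoc, ih]

theorem foldl_max_cons (x : Int) (l : List Int) :
    (x :: l).foldl max 0 = max x (l.foldl max 0) := by
  simp only [List.foldl_cons]
  rw [max_comm 0 x, foldl_max_max]

theorem foldl_max_nonneg (l : List Int) : 0 ≤ l.foldl max 0 := by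
  induction l with
  | nil => simp
  | cons x t ih => rw [foldl_max_cons]; exact le_trans ih (le_max_right _ _)

theorem ansB_nil : ansB [] = 0 := rfl

theorem ansB_cons_true (n : Int) (t : List (Bool × Int)) :
    ansB ((true, n) :: t) = max n (ansB t) := by
  simp only [ansB, List.filterMap_cons, if_pos]
  exact foldl_max_cons n _

theorem ansB_cons_false (n : Int) (t : List (Bool × Int)) :
    ansB ((false, n) :: t) = ansB t := by
  simp [ansB]

theorem ansB_nonneg (runs : List (Bool × Int)) : 0 ≤ ansB runs := foldl_max_nonneg _

theorem ansB_step_mono (ib : Int) (runs : List (Bool × Int)) (box : List (String × Int)) :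
    ansB runs ≤ ansB (runsStep ib runs box) := by
  unfold runsStep
  rcases runs with _ | ⟨⟨k', n⟩, t⟩
  · rcases h : decide ((boxGet? box).getD 0 ≠ ib) with _ | _ <;>
      simp [ansB_nil, ansB_cons_true, ansB_cons_false]
  · rcases h : decide ((boxGet? box).getD 0 ≠ ib) with _ | _ <;>
      rcases k' with _ | _ <;>
      simp [ansB_cons_true, ansB_cons_false] <;> omega

theorem ansB_foldl_mono (ib : Int) (boxes : List (List (String × Int))) :
    ∀ runs, ansB runs ≤ ansB (boxes.foldl (runsStep ib) runs) := by
  induction boxes with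
  | nil => intro runs; simp
  | cons b t ih =>
    intro runs
    exact le_trans (ansB_step_mono ib runs b) (ih _)

-- continuation of one loop step on a non-matching box, given the updated run list r'
theorem loop_cont (ib : Int) (rest : List (List (String × Int)))
    (ih : ∀ res count runs, headLen runs = count → ansB runs ≤ res →
      minBoxLoop ib rest res count = max res (ansB (rest.foldl (runsStep ib) runs)))
    (res count : Int) (r' : List (Bool × Int))
    (hh : headLen r' = count + 1)
    (hub : ansB r' ≤ max res (count + 1))
    (hlb : count + 1 ≤ ansB r') :
    (if count + 1 > res then minBoxLoop ib rest (count + 1) (count + 1)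
     else minBoxLoop ib rest res (count + 1)) = max res (ansB (rest.foldl (runsStep ib) r')) := by
  have hm := ansB_foldl_mono ib rest r'
  by_cases hc : count + 1 > res
  · rw [if_pos hc, ih (count + 1) (count + 1) r' hh (by omega)]
    omega
  · rw [if_neg hc, ih res (count + 1) r' hh (by omega)]

theorem loop_eq (ib : Int) (boxes : List (List (String × Int))) :
    ∀ res count runs, headLen runs = count → ansB runs ≤ res →
      minBoxLoop ib boxes res count = max res (ansB (boxes.foldl (runsStep ib) runs)) := by
  induction boxes with
  | nil =>
    intro res count runs _ hle
    simp only [minBoxLoop, List.foldl_nil]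
    omega
  | cons box rest ih =>
    intro res count runs hhead hle
    simp only [minBoxLoop, List.foldl_cons]
    by_cases hk : (boxGet? box).getD 0 ≠ ib
    · -- key is true: extend / start a non-matching run
      rw [if_pos hk]
      rcases runs with _ | ⟨⟨k', n⟩, t⟩
      · have hs : runsStep ib [] box = [(true, 1)] := by simp [runsStep, hk]
        have hc0 : count = 0 := by simpa [headLen] using hhead.symm
        rw [hs]
        refine loop_cont ib rest ih res count [(true, 1)] (by simp [headLen, hc0]) ?_ ?_ <;>
          · rw [ansB_cons_true, ansB_nil]; omega
      · rcases k' with _ | _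
        · -- head run is a matching run: start a fresh non-matching run
          have hs : runsStep ib ((false, n) :: t) box = (true, 1) :: (false, n) :: t := by
            simp [runsStep, hk]
          have hc0 : count = 0 := by simpa [headLen] using hhead.symm
          rw [hs]
          rw [ansB_cons_false] at hle
          have hnn := ansB_nonneg t
          refine loop_cont ib rest ih res count _ (by simp [headLen, hc0]) ?_ ?_ <;>
            · rw [ansB_cons_true, ansB_cons_false]; omega
        · -- head run is a non-matching run of length n = count: extend it
          have hs : runsStep ib ((true, n) :: t) box = (true, n + 1) :: t := by
            simp [runsStep, hk]
          have hcn : n = count := by simpa [headLen] using hhead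
          rw [hs]
          rw [ansB_cons_true] at hle
          have hnn := ansB_nonneg t
          refine loop_cont ib rest ih res count _ (by simp [headLen, hcn]) ?_ ?_ <;>
            · rw [ansB_cons_true]; omega
    · -- key is false: the counter resets; the non-matching run lengths are unchanged
      rw [if_neg hk]
      rw [not_not] at hk
      have hstep : headLen (runsStep ib runs box) = 0 ∧
          ansB (runsStep ib runs box) = ansB runs := by
        unfold runsStep
        rcases runs with _ | ⟨⟨k', n⟩, t⟩
        · simp [hk, headLen, ansB_nil, ansB_cons_false]
        · rcases k' with _ | _ <;>
            simp [hk, headLen, ansB_cons_false]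
      exact ih res 0 _ hstep.1 (by rw [hstep.2]; exact hle)

-- ===== VERDICT (by name: the statement is the Claim_ definition above) =====
theorem minBox_spec : Claim_equal_minBox := by
  intro allBoxes inputBox _ _
  unfold Spec_minBox minBox minBox_alt
  rw [loop_eq inputBox allBoxes 0 0 [] rfl (by simp [ansB])]
  have := ansB_nonneg (allBoxes.foldl (runsStep inputBox) [])
  unfold ansB at this ⊢
  omega
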